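-- pv_equiv track=rewrite | github.com/qqqqlss/Python-coding-test | 카운트 다운.py | solution
-- ===== SOURCE A (Python) =====
-- import itertools
--
-- def solution(target):
--     all = [50]
--     all.extend(i for i in range(1,21))
--     all.extend(i*2 for i in range(1,21))
--     all.extend(i*3 for i in range(1,21))
--     all = list(set(all))
--
--     tot = 0
--
--     while target >= 300:
--         tot += 1
--         target -= 60
--
--     r = []
--     for i in range(1,target+1): #회수 별로 target될때 까지 조합
--         r = [v for v in itertools.combinations_with_replacement(all,i) if sum(v)==target]
--         if len(r) > 0:
--             break
--
--     if (len(r)) == 0: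
--         return [tot, 0]
--
--     ct = max([len([v for v in x if v <= 20 or v==50]) for x in r]) #싱글, 50 가장 많은 거
--
--     answer = [len(r[0])+tot, ct]
--
--     return answer
-- ===== SOURCE B (Python) =====
-- def solution(target):
--     vals = sorted(set(range(1, 21)) | set(range(2, 41, 2)) | set(range(3, 61, 3)) | {50})
--     tot = (target - 240) // 60 if target >= 300 else 0
--     t = target - 60 * tot
--     if t <= 0:
--         return [tot, 0]
--     best = [(0, 0)]  # best[s] = (min darts to reach s, max singles among min-dart ways)
--     for s in range(1, t + 1):
--         bd, bc = t + 1, 0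
--         for v in vals:
--             if v <= s:
--                 d, c = best[s - v]
--                 d += 1
--                 if v <= 20 or v == 50:
--                     c += 1
--                 if d < bd or (d == bd and c > bc):
--                     bd, bc = d, c
--         best.append((bd, bc))
--     return [best[t][0] + tot, best[t][1]]
-- ===== Notes on version B (the rewrite author's own statement) =====
-- stated objective: faster
-- what changed: replaces A's exhaustive itertools.combinations_with_replacement search (growing the dart count until some combination hits the target) with a coin-change style DP over sums 1..t that tracks (min darts, max singles/bull count) per sum, and replaces the subtract-60 while loop with one closed-form floor division
import Mathlib
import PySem

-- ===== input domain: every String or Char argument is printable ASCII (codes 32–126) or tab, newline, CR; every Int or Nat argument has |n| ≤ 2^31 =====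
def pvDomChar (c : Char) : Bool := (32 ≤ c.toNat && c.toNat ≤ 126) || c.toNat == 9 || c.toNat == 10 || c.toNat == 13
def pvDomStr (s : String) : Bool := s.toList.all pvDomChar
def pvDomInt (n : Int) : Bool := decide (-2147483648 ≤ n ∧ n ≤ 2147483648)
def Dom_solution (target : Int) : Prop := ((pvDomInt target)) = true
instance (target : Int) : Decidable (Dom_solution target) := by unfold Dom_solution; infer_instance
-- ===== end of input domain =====

-- B replaces A's exhaustive combinations_with_replacement search by a coin-change DP over
-- sums (min darts, then max singles), and A's subtract-60 while loop by one division: faster.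

-- ===== PORT A =====

-- itertools.combinations_with_replacement(l, n), in the lexicographic order over l's order
def cwrA : List Int → Nat → List (List Int)
  | _, 0 => [[]]
  | [], _ + 1 => []
  | x :: xs, n + 1 => ((cwrA (x :: xs) n).map (fun v => x :: v)) ++ cwrA xs (n + 1)
  termination_by l n => (n, l.length)

-- all = [50]; all.extend(...); all = list(set(all))  (output below is set-order independent)
def allA : List Int :=
  PySem.Set.ofList ([(50 : Int)] ++ PySem.List.pyRange 1 21 1
    ++ (PySem.List.pyRange 1 21 1).map (fun i => i * 2)
    ++ (PySem.List.pyRange 1 21 1).map (fun i => i * 3))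

-- while target >= 300: tot += 1; target -= 60
def whileA (target tot : Int) : Int × Int :=
  if h : 300 ≤ target then whileA (target - 60) (tot + 1) else (target, tot)
  termination_by target.toNat
  decreasing_by omega

-- for i in range(1, target+1): r = [v for v in cwr(all,i) if sum(v)==target]; if len(r)>0: break
-- (i comes from range(1, t+1), so i ≥ 1 and i.toNat is exact)
def loopA (t : Int) : List Int → List (List Int)
  | [] => []
  | i :: rest =>
      let r := (cwrA allA i.toNat).filter (fun v => decide (v.sum = t))
      if r.length > 0 then r else loopA t rest

def solution (target : Int) : List Int :=
  let (t, tot) := whileA target 0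
  let r := loopA t (PySem.List.pyRange 1 (t + 1) 1)
  if r.length = 0 then [tot, 0]
  else
    -- max(...) on a list that is nonempty in this branch, so the .getD 0 default is unreachable
    let ct : Int :=
      ((PySem.List.max? (r.map (fun x =>
        ((x.filter (fun v => decide (v ≤ 20 ∨ v = 50))).length : Int))) (fun y => y)).getD 0)
    [((r.headD []).length : Int) + tot, ct]

-- ===== PORT B =====

-- vals = sorted(set(range(1,21)) | set(range(2,41,2)) | set(range(3,61,3)) | {50})
def valsB : List Int :=
  PySem.List.sorted
    (PySem.Set.union (PySem.Set.union (PySem.Set.union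
      (PySem.Set.ofList (PySem.List.pyRange 1 21 1))
      (PySem.List.pyRange 2 41 2)) (PySem.List.pyRange 3 61 3)) [(50 : Int)])
    (fun x => x) false

def solution_alt (target : Int) : List Int :=
  let tot : Int := if 300 ≤ target then PySem.Int.floordiv (target - 240) 60 else 0
  let t := target - 60 * tot
  if t ≤ 0 then [tot, 0]
  else
    -- best[s - v] is always in range (0 ≤ s - v < len best), so the .getD default is unreachable
    let best := (PySem.List.pyRange 1 (t + 1) 1).foldl (fun best s =>
      let p := valsB.foldl (fun (p : Int × Int) v =>
        if v ≤ s then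
          let q := (PySem.List.pyGet? best (s - v)).getD (0, 0)
          let d := q.1 + 1
          let c := if v ≤ 20 ∨ v = 50 then q.2 + 1 else q.2
          if d < p.1 ∨ (d = p.1 ∧ c > p.2) then (d, c) else p
        else p) (t + 1, 0)
      best ++ [p]) [((0 : Int), (0 : Int))]
    let q := (PySem.List.pyGet? best t).getD (0, 0)
    [q.1 + tot, q.2]

-- ===== PRECONDITION & SPEC =====
def Spec_solution (target : Int) (out : List Int) : Prop := out = solution_alt target
instance (target : Int) (out : List Int) : Decidable (Spec_solution target out) := by unfold Spec_solution; infer_instance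

-- ===== CLAIM (what is proved, stated in full; the proofs are below) =====
def Claim_equal_solution : Prop := ∀ (target : Int), Dom_solution target → Spec_solution target (solution target)

-- ===== LEMMAS AND PROOFS =====

-- the 42 distinct dart values, in A's set-insertion order and in B's sorted order
def allLit : List Int := [50, 1, 2, 3, 4, 5, 6, 7, 8, 9, 10, 11, 12, 13, 14, 15, 16, 17, 18, 19, 20, 22, 24, 26, 28, 30, 32, 34, 36, 38, 40, 21, 27, 33, 39, 42, 45, 48, 51, 54, 57, 60]
def valsLit : List Int := [1, 2, 3, 4, 5, 6, 7, 8, 9, 10, 11, 12, 13, 14, 15, 16, 17, 18, 19, 20, 21, 22, 24, 26, 27, 28, 30, 32, 33, 34, 36, 38, 39, 40, 42, 45, 48, 50, 51, 54, 57, 60]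

set_option maxRecDepth 10000 in
theorem allA_eq : allA = allLit := by decide
set_option maxRecDepth 10000 in
theorem valsB_eq : valsB = valsLit := by decide
theorem all_sub_vals : ∀ x ∈ allLit, x ∈ valsLit := by decide
theorem vals_sub_all : ∀ x ∈ valsLit, x ∈ allLit := by decide
theorem vals_pos : ∀ x ∈ valsLit, 1 ≤ x ∧ x ≤ 60 := by decide
theorem one_mem_vals : (1 : Int) ∈ valsLit := by decide

-- single-or-bull counter predicate
def sg : Int → Bool := fun v => decide (v ≤ 20 ∨ v = 50)

-- RepD i s c: some multiset of i dart values sums to s with exactly c singles/bulls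
def RepD (i : Nat) (s : Int) (c : Nat) : Prop :=
  ∃ w : List Int, w.length = i ∧ (∀ x ∈ w, x ∈ valsLit) ∧ w.sum = s ∧ w.countP sg = c

theorem sum_ge_len : ∀ (w : List Int), (∀ x ∈ w, x ∈ valsLit) → (w.length : Int) ≤ w.sum := by
  intro w
  induction w with
  | nil => simp
  | cons x xs ih =>
    intro h
    have hx := (vals_pos x (h x (by simp))).1
    have hxs := ih (fun y hy => h y (by simp [hy]))
    simp only [List.length_cons, List.sum_cons]
    push_cast
    omega

theorem RepD_zero (s : Int) (c : Nat) : RepD 0 s c ↔ s = 0 ∧ c = 0 := by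
  constructor
  · rintro ⟨w, hl, _, hs, hc⟩
    rw [List.length_eq_zero_iff] at hl
    subst hl
    simp only [List.sum_nil] at hs
    simp only [List.countP_nil] at hc
    exact ⟨hs.symm, hc.symm⟩
  · rintro ⟨rfl, rfl⟩
    exact ⟨[], rfl, by simp, by simp, by simp⟩

theorem RepD_le_sum {i : Nat} {s : Int} {c : Nat} (h : RepD i s c) : (i : Int) ≤ s := by
  obtain ⟨w, hl, hm, hs, _⟩ := h
  have := sum_ge_len w hm
  omega

theorem RepD_succ (i : Nat) (s : Int) (c : Nat) :
    RepD (i + 1) s c ↔ ∃ v ∈ valsLit, ∃ c', RepD i (s - v) c' ∧ c = c' + (if sg v then 1 else 0) := by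
  constructor
  · rintro ⟨w, hl, hm, hs, hc⟩
    cases w with
    | nil => simp at hl
    | cons x xs =>
      refine ⟨x, hm x (by simp), xs.countP sg, ⟨xs, by simpa using hl,
        fun y hy => hm y (by simp [hy]), by simp at hs; omega, rfl⟩, ?_⟩
      rw [← hc, List.countP_cons]
  · rintro ⟨v, hv, c', ⟨w, hl, hm, hs, hc⟩, rfl⟩
    refine ⟨v :: w, by simp [hl], ?_, by simp [hs], ?_⟩
    · intro y hy
      rcases List.mem_cons.1 hy with rfl | hy
      · exact hv
      · exact hm y hy
    · rw [List.countP_cons, hc]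

theorem RepD_ones (n : Nat) : RepD n (n : Int) n := by
  refine ⟨List.replicate n 1, by simp, ?_, by simp, ?_⟩
  · intro y hy
    rw [List.eq_of_mem_replicate hy]
    exact one_mem_vals
  · rw [List.countP_replicate]
    simp [sg]

-- cwr soundness/completeness
theorem cwrA_zero (l : List Int) : cwrA l 0 = [[]] := by cases l <;> rw [cwrA]
theorem cwrA_cons_succ (x : Int) (xs : List Int) (n : Nat) :
    cwrA (x :: xs) (n + 1) = ((cwrA (x :: xs) n).map (fun v => x :: v)) ++ cwrA xs (n + 1) := by
  rw [cwrA]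

theorem cwr_sound : ∀ (l : List Int) (i : Nat), ∀ w ∈ cwrA l i, w.length = i ∧ ∀ x ∈ w, x ∈ l := by
  intro l i
  induction l, i using cwrA.induct with
  | case1 l =>
    intro w hw
    rw [cwrA] at hw
    simp only [List.mem_singleton] at hw
    subst hw
    simp
  | case2 n =>
    intro w hw
    rw [cwrA] at hw
    simp at hw
  | case3 x xs n ih1 ih2 =>
    intro w hw
    rw [cwrA] at hw
    rcases List.mem_append.1 hw with h | h
    · rcases List.mem_map.1 h with ⟨v, hv, rfl⟩
      obtain ⟨hl, hm⟩ := ih1 v hv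
      refine ⟨by simp [hl], ?_⟩
      intro y hy
      rcases List.mem_cons.1 hy with rfl | hy
      · exact List.mem_cons_self
      · exact hm y hy
    · obtain ⟨hl, hm⟩ := ih2 w h
      exact ⟨hl, fun y hy => List.mem_cons_of_mem _ (hm y hy)⟩

theorem cwr_complete : ∀ (n : Nat) (l w : List Int), w.length + l.length ≤ n →
    (∀ x ∈ w, x ∈ l) → ∃ u ∈ cwrA l w.length, u.Perm w := by
  intro n
  induction n with
  | zero =>
    intro l w h hm
    have hw : w = [] := by
      cases w with
      | nil => rfl
      | cons a b => simp at h
    subst hw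
    exact ⟨[], by simp only [List.length_nil, cwrA_zero]; simp, List.Perm.refl []⟩
  | succ n ih =>
    intro l w h hm
    cases w with
    | nil => exact ⟨[], by simp only [List.length_nil, cwrA_zero]; simp, List.Perm.refl []⟩
    | cons a b =>
      cases l with
      | nil => exact absurd (hm a (by simp)) (by simp)
      | cons x xs =>
        by_cases hx : x ∈ a :: b
        · -- remove one copy of x; the recursion stays on x :: xs with one fewer element
          have hperm : (a :: b).Perm (x :: (a :: b).erase x) := List.perm_cons_erase hx
          have hlen : ((a :: b).erase x).length + 1 = (a :: b).length := by
            rw [List.length_erase_of_mem hx]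
            simp
          obtain ⟨u', hu', hp'⟩ := ih (x :: xs) ((a :: b).erase x)
            (by have h2 := hlen; simp only [List.length_cons] at h h2 ⊢; omega)
            (fun y hy => hm y (List.mem_of_mem_erase hy))
          refine ⟨x :: u', ?_, ?_⟩
          · have he : (a :: b).length = ((a :: b).erase x).length + 1 := hlen.symm
            rw [he, cwrA_cons_succ]
            exact List.mem_append.2 (Or.inl (List.mem_map.2 ⟨u', hu', rfl⟩))
          · exact (hp'.cons x).trans hperm.symm
        · -- x never occurs: everything lives in xs
          have hsub : ∀ y ∈ a :: b, y ∈ xs := by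
            intro y hy
            rcases List.mem_cons.1 (hm y hy) with rfl | hyy
            · exact absurd hy hx
            · exact hyy
          obtain ⟨u, hu, hp⟩ := ih xs (a :: b)
            (by simp only [List.length_cons] at h ⊢; omega) hsub
          refine ⟨u, ?_, hp⟩
          rw [show (a :: b).length = b.length + 1 from rfl, cwrA_cons_succ]
          exact List.mem_append.2 (Or.inr (by simpa using hu))

-- optimality predicate the DP maintains
def Popt (s : Nat) (p : Int × Int) : Prop :=
  0 ≤ p.1 ∧ 0 ≤ p.2 ∧ RepD p.1.toNat (s : Int) p.2.toNat ∧
  (∀ i c', RepD i (s : Int) c' → p.1.toNat ≤ i) ∧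
  (∀ c', RepD p.1.toNat (s : Int) c' → c' ≤ p.2.toNat)

-- the inner fold (lexicographic best) of B, abstracted over the candidate map
def lexStep (s : Int) (cand : Int → Int × Int) (p : Int × Int) (v : Int) : Int × Int :=
  if v ≤ s then
    if (cand v).1 < p.1 ∨ ((cand v).1 = p.1 ∧ (cand v).2 > p.2) then cand v else p
  else p

theorem lex_fold (s : Int) (cand : Int → Int × Int) :
    ∀ (l : List Int) (p0 : Int × Int),
      let p := l.foldl (lexStep s cand) p0
      (p = p0 ∨ ∃ v ∈ l, v ≤ s ∧ cand v = p) ∧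
      (∀ v ∈ l, v ≤ s → p.1 ≤ (cand v).1) ∧ p.1 ≤ p0.1 ∧
      (∀ v ∈ l, v ≤ s → (cand v).1 = p.1 → (cand v).2 ≤ p.2) ∧ (p.1 = p0.1 → p0.2 ≤ p.2) := by
  intro l
  induction l with
  | nil =>
    intro p0
    exact ⟨Or.inl rfl, by simp, le_refl _, by simp, fun _ => le_refl _⟩
  | cons v rest ih =>
    intro p0
    simp only [List.foldl_cons]
    obtain ⟨h1, h2, h3, h4, h5⟩ := ih (lexStep s cand p0 v)
    have hstep : (lexStep s cand p0 v = p0 ∧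
        (v ≤ s → ((cand v).1 > p0.1 ∨ ((cand v).1 = p0.1 ∧ (cand v).2 ≤ p0.2)))) ∨
        (v ≤ s ∧ lexStep s cand p0 v = cand v ∧
          ((cand v).1 < p0.1 ∨ ((cand v).1 = p0.1 ∧ (cand v).2 > p0.2))) := by
      unfold lexStep
      split_ifs with hv hc
      · exact Or.inr ⟨hv, rfl, hc⟩
      · refine Or.inl ⟨rfl, fun _ => ?_⟩
        rcases lt_trichotomy (cand v).1 p0.1 with h | h | h
        · exact absurd (Or.inl h) hc
        · refine Or.inr ⟨h, ?_⟩
          by_contra hgt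
          exact hc (Or.inr ⟨h, by omega⟩)
        · exact Or.inl h
      · exact Or.inl ⟨rfl, fun hvv => absurd hvv hv⟩
    set p1 := lexStep s cand p0 v with hp1def
    set P := rest.foldl (lexStep s cand) p1 with hPdef
    have hp1le : p1.1 ≤ p0.1 := by
      rcases hstep with ⟨he, _⟩ | ⟨_, he, hc⟩
      · rw [he]
      · rw [he]; rcases hc with h | ⟨h, _⟩ <;> omega
    refine ⟨?_, ?_, ?_, ?_, ?_⟩
    · rcases h1 with hP | ⟨u, hu, hus, huc⟩
      · rcases hstep with ⟨he, _⟩ | ⟨hv, he, _⟩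
        · exact Or.inl (hP.trans he)
        · exact Or.inr ⟨v, by simp, hv, by rw [← he, ← hP]⟩
      · exact Or.inr ⟨u, by simp [hu], hus, huc⟩
    · intro u hu hus
      rcases List.mem_cons.1 hu with rfl | hur
      · rcases hstep with ⟨he, hge⟩ | ⟨_, he, _⟩
        · rcases hge hus with h | ⟨h, _⟩ <;>
            · have := h3; rw [he] at this; omega
        · have := h3; rw [he] at this; omega
      · exact h2 u hur hus
    · omega
    · intro u hu hus huf
      rcases List.mem_cons.1 hu with rfl | hur
      · rcases hstep with ⟨he, hge⟩ | ⟨_, he, _⟩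
        · have h3' := h3
          rw [he] at h3' h5
          rcases hge hus with h | ⟨h, hle⟩
          · omega
          · have := h5 (by omega)
            omega
        · have h5' := h5
          rw [he] at h5'
          exact h5' (by omega)
      · exact h4 u hur hus huf
    · intro hPf
      rcases hstep with ⟨he, _⟩ | ⟨_, he, hc⟩
      · rw [he] at h5; exact h5 (by omega)
      · rw [he] at h5 h3
        rcases hc with h | ⟨h, hgt⟩
        · omega
        · have := h5 (by omega); omega

-- B's outer fold, as a function of the upper bound
def bestF (t : Int) (k : Nat) : List (Int × Int) :=
  (PySem.List.pyRange 1 ((k : Int) + 1) 1).foldl (fun best s =>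
    best ++ [valsB.foldl (fun (p : Int × Int) v =>
      if v ≤ s then
        let q := (PySem.List.pyGet? best (s - v)).getD (0, 0)
        let d := q.1 + 1
        let c := if v ≤ 20 ∨ v = 50 then q.2 + 1 else q.2
        if d < p.1 ∨ (d = p.1 ∧ c > p.2) then (d, c) else p
      else p) (t + 1, 0)]) [((0 : Int), (0 : Int))]

-- the candidate produced by dart v at sum s = k+1, reading the table for k
def candf (t : Int) (k : Nat) : Int → Int × Int := fun v =>
  (((PySem.List.pyGet? (bestF t k) (((k : Int) + 1) - v)).getD (0, 0)).1 + 1,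
   if v ≤ 20 ∨ v = 50 then ((PySem.List.pyGet? (bestF t k) (((k : Int) + 1) - v)).getD (0, 0)).2 + 1
   else ((PySem.List.pyGet? (bestF t k) (((k : Int) + 1) - v)).getD (0, 0)).2)

theorem bestF_succ (t : Int) (k : Nat) :
    bestF t (k + 1) = bestF t k ++ [valsB.foldl (lexStep ((k : Int) + 1) (candf t k)) (t + 1, 0)] := by
  unfold bestF
  rw [show ((k + 1 : Nat) : Int) + 1 = ((k : Int) + 1) + 1 by push_cast; ring]
  rw [PySem.List.pyRange_one_succ_right (by omega), List.foldl_append]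
  simp only [List.foldl_cons, List.foldl_nil]
  rfl

theorem bestF_inv (t : Int) (ht : 1 ≤ t) :
    ∀ k : Nat, (k : Int) ≤ t →
      (bestF t k).length = k + 1 ∧ ∀ s : Nat, (hs : s ≤ k) → Popt s ((bestF t k).getD s (0, 0)) := by
  intro k
  induction k with
  | zero =>
    intro _
    have h0 : bestF t 0 = [(0, 0)] := by
      unfold bestF
      rw [PySem.List.pyRange_one_eq_nil (by norm_num)]
      rfl
    rw [h0]
    refine ⟨rfl, ?_⟩
    intro s hs
    interval_cases s
    refine ⟨le_refl _, le_refl _, ?_, ?_, ?_⟩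
    · exact ⟨[], rfl, by simp, by simp, by simp⟩
    · intro i c' _
      exact Nat.zero_le _
    · intro c' hc'
      have h' : RepD 0 0 c' := by exact_mod_cast hc'
      have := ((RepD_zero _ _).1 h').2
      omega
  | succ k ih =>
    intro hk1
    obtain ⟨hlen, hP⟩ := ih (by omega)
    set s : Int := (k : Int) + 1 with hsdef
    have hcast : ((k + 1 : Nat) : Int) = s := by push_cast; omega
    -- facts about the candidate of each admissible dart value v
    have hcand : ∀ v ∈ valsLit, v ≤ s →
        ∃ u : Nat, (u : Int) = s - v ∧ u ≤ k ∧
          candf t k v = (((bestF t k).getD u (0, 0)).1 + 1,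
            if v ≤ 20 ∨ v = 50 then ((bestF t k).getD u (0, 0)).2 + 1
            else ((bestF t k).getD u (0, 0)).2) := by
      intro v hv hvs
      have hv1 := (vals_pos v hv).1
      refine ⟨(s - v).toNat, by omega, by omega, ?_⟩
      unfold candf
      have hg : PySem.List.pyGet? (bestF t k) (((k : Int) + 1) - v) =
          (bestF t k)[(((k : Int) + 1) - v).toNat]? :=
        PySem.List.pyGet?_of_nonneg (bestF t k) (by omega)
      rw [hg, ← List.getD_eq_getElem?_getD]
    have hlex := lex_fold s (candf t k) valsB (t + 1, 0)
    simp only [valsB_eq] at hlex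
    obtain ⟨A1, A2, A3, A4, A5⟩ := hlex
    set P := valsLit.foldl (lexStep s (candf t k)) (t + 1, 0) with hPdef
    -- the value 1 shows the sentinel is beaten
    have hone : (candf t k 1).1 ≤ s := by
      obtain ⟨u, hu, huk, hc⟩ := hcand 1 one_mem_vals (by omega)
      obtain ⟨hq1, _, _, hmin, _⟩ := hP u huk
      have := hmin u u (by
        have h' := RepD_ones u
        exact h')
      rw [hc]
      simp only
      omega
    have hPle : P.1 ≤ s := le_trans (A2 1 one_mem_vals (by omega)) hone
    have hwit : ∃ v ∈ valsLit, v ≤ s ∧ candf t k v = P := by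
      rcases A1 with h | h
      · exfalso
        rw [h] at hPle
        simp at hPle
        omega
      · exact h
    obtain ⟨v0, hv0, hv0s, hv0c⟩ := hwit
    obtain ⟨u0, hu0, hu0k, hc0⟩ := hcand v0 hv0 hv0s
    obtain ⟨hq01, hq02, hq0R, hq0min, hq0max⟩ := hP u0 hu0k
    have hPval : P = (((bestF t k).getD u0 (0, 0)).1 + 1,
        if v0 ≤ 20 ∨ v0 = 50 then ((bestF t k).getD u0 (0, 0)).2 + 1
        else ((bestF t k).getD u0 (0, 0)).2) := by rw [← hv0c, hc0]
    have hPfst : P.1 = ((bestF t k).getD u0 (0, 0)).1 + 1 := by rw [hPval]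
    have hPsnd : P.2 = (if v0 ≤ 20 ∨ v0 = 50 then ((bestF t k).getD u0 (0, 0)).2 + 1
        else ((bestF t k).getD u0 (0, 0)).2) := by rw [hPval]
    have hP1 : 0 ≤ P.1 := by omega
    have hP2 : 0 ≤ P.2 := by
      by_cases hsg : v0 ≤ 20 ∨ v0 = 50
      · rw [if_pos hsg] at hPsnd; omega
      · rw [if_neg hsg] at hPsnd; omega
    -- the new table entry is exactly P
    have hnew : Popt (k + 1) P := by
      refine ⟨hP1, hP2, ?_, ?_, ?_⟩
      · -- realizability
        have : RepD (((bestF t k).getD u0 (0, 0)).1.toNat + 1) ((k + 1 : Nat) : Int)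
            (((bestF t k).getD u0 (0, 0)).2.toNat + (if sg v0 then 1 else 0)) := by
          rw [hcast]
          refine (RepD_succ _ _ _).2 ⟨v0, hv0, ((bestF t k).getD u0 (0, 0)).2.toNat, ?_, rfl⟩
          rw [show s - v0 = (u0 : Int) by omega]
          exact hq0R
        have e1 : P.1.toNat = ((bestF t k).getD u0 (0, 0)).1.toNat + 1 := by omega
        have e2 : P.2.toNat = ((bestF t k).getD u0 (0, 0)).2.toNat + (if sg v0 then 1 else 0) := by
          by_cases hsg : v0 ≤ 20 ∨ v0 = 50
          · rw [if_pos hsg] at hPsnd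
            rw [show sg v0 = true from decide_eq_true hsg]
            simp only [if_true]
            omega
          · rw [if_neg hsg] at hPsnd
            rw [show sg v0 = false by simp [sg, hsg]]
            simp only [Bool.false_eq_true, if_false]
            omega
        rw [← e1, ← e2] at this
        exact this
      · -- minimality
        intro i c' hR
        cases i with
        | zero =>
          exfalso
          have := ((RepD_zero _ _).1 hR).1
          rw [hcast] at this
          omega
        | succ j =>
          obtain ⟨v, hv, c'', hRv, _⟩ := (RepD_succ _ _ _).1 (by rw [hcast] at hR; exact hR)
          have hvs : v ≤ s := by
            have hj := RepD_le_sum hRv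
            omega
          obtain ⟨u, hu, huk, hc⟩ := hcand v hv hvs
          obtain ⟨hq1, _, _, hmin, _⟩ := hP u huk
          have hju : ((bestF t k).getD u (0, 0)).1.toNat ≤ j := by
            apply hmin j c''
            rw [show ((u : Nat) : Int) = s - v by omega]
            exact hRv
          have hA2 := A2 v hv hvs
          rw [hc] at hA2
          simp only at hA2
          omega
      · -- maximality among minimal-dart representations
        intro c' hR
        have hP1pos : P.1.toNat ≠ 0 := by
          intro h0
          rw [h0] at hR
          have := ((RepD_zero _ _).1 hR).1
          rw [hcast] at this
          omega
        obtain ⟨j, hj⟩ : ∃ j, P.1.toNat = j + 1 := ⟨P.1.toNat - 1, by omega⟩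
        rw [hj] at hR
        obtain ⟨v, hv, c'', hRv, hcc⟩ := (RepD_succ _ _ _).1 (by rw [hcast] at hR; exact hR)
        have hvs : v ≤ s := by
          have hjj := RepD_le_sum hRv
          omega
        obtain ⟨u, hu, huk, hc⟩ := hcand v hv hvs
        obtain ⟨hq1, hq2, _, hmin, hmax⟩ := hP u huk
        have hju : ((bestF t k).getD u (0, 0)).1.toNat ≤ j := by
          apply hmin j c''
          rw [show ((u : Nat) : Int) = s - v by omega]
          exact hRv
        have hA2 := A2 v hv hvs
        rw [hc] at hA2
        simp only at hA2
        -- the candidate of v attains P.1, hence its count is ≤ P.2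
        have heq1 : (candf t k v).1 = P.1 := by
          rw [hc]
          simp only
          omega
        have hA4 := A4 v hv hvs heq1
        have hju' : ((bestF t k).getD u (0, 0)).1.toNat = j := by omega
        have hcu : c'' ≤ ((bestF t k).getD u (0, 0)).2.toNat := by
          apply hmax
          rw [hju', show ((u : Nat) : Int) = s - v by omega]
          exact hRv
        rw [hc] at hA4
        subst hcc
        by_cases hsg : v ≤ 20 ∨ v = 50
        · rw [if_pos hsg] at hA4
          have hsg' : sg v = true := decide_eq_true hsg
          rw [hsg']
          simp only [if_true]
          omega
        · rw [if_neg hsg] at hA4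
          have hsg' : sg v = false := by simp [sg, hsg]
          rw [hsg']
          simp only [Bool.false_eq_true, if_false]
          omega
    -- assemble: length and entries of the appended table
    rw [bestF_succ, valsB_eq, ← hPdef]
    constructor
    · simp [hlen]
    · intro s' hs'
      by_cases hlt : s' ≤ k
      · rw [List.getD_append _ _ _ _ (by omega)]
        exact hP s' hlt
      · have hse : s' = k + 1 := by omega
        subst hse
        have hlast : (bestF t k ++ [P]).getD (k + 1) (0, 0) = P := by
          rw [List.getD_eq_getElem?_getD, List.getElem?_append_right (by omega), hlen]
          simp
        rw [hlast]
        exact hnew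

-- A's while loop equals the closed-form division
theorem whileA_eq (target tot : Int) :
    whileA target tot =
      (target - 60 * (if 300 ≤ target then PySem.Int.floordiv (target - 240) 60 else 0),
       tot + (if 300 ≤ target then PySem.Int.floordiv (target - 240) 60 else 0)) := by
  induction target, tot using whileA.induct
  case _ target tot h ih =>
    rw [whileA, dif_pos h, ih]
    have h60 : PySem.Int.floordiv (target - 240) 60 = (target - 240) / 60 :=
      PySem.Int.floordiv_eq_ediv_of_pos (by norm_num)
    have h60' : PySem.Int.floordiv (target - 60 - 240) 60 = (target - 60 - 240) / 60 :=
      PySem.Int.floordiv_eq_ediv_of_pos (by norm_num)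
    rw [h60, h60', if_pos h, Prod.mk.injEq]
    split_ifs with h2 <;> constructor <;> omega
  case _ target tot h =>
    rw [whileA, dif_neg h, if_neg h]
    simp

-- A's search loop, run from counter a, returns the filtered combination list at the least size m
theorem loopA_found (t : Int) (m : Nat) (hm1 : 1 ≤ m) (hmt : (m : Int) ≤ t)
    (hbelow : ∀ j : Nat, 1 ≤ j → j < m → (cwrA allA j).filter (fun v => decide (v.sum = t)) = [])
    (hfound : (cwrA allA m).filter (fun v => decide (v.sum = t)) ≠ []) :
    ∀ a : Int, 1 ≤ a → a ≤ (m : Int) →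
      loopA t (PySem.List.pyRange a (t + 1) 1) = (cwrA allA m).filter (fun v => decide (v.sum = t)) := by
  suffices H : ∀ k : Nat, ∀ a : Int, 1 ≤ a → a ≤ (m : Int) → ((m : Int) - a).toNat = k →
      loopA t (PySem.List.pyRange a (t + 1) 1) = (cwrA allA m).filter (fun v => decide (v.sum = t)) by
    intro a ha ham
    exact H ((m : Int) - a).toNat a ha ham rfl
  intro k
  induction k with
  | zero =>
    intro a ha ham hk
    have haa : a = (m : Int) := by omega
    subst haa
    rw [PySem.List.pyRange_one_cons (by omega : (m : Int) < t + 1)]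
    simp only [loopA, Int.toNat_natCast]
    rw [if_pos (List.length_pos_iff.2 hfound)]
  | succ k ih =>
    intro a ha ham hk
    rw [PySem.List.pyRange_one_cons (by omega : a < t + 1)]
    simp only [loopA]
    rw [hbelow a.toNat (by omega) (by omega)]
    simpa using ih (a + 1) (by omega) (by omega) (by omega)

-- core: for residual 1 ≤ t, A's search output agrees with B's DP entry
theorem core (t : Int) (ht : 1 ≤ t) (tot : Int) :
    (let r := loopA t (PySem.List.pyRange 1 (t + 1) 1)
     if r.length = 0 then [tot, 0]
     else
       let ct : Int :=
         ((PySem.List.max? (r.map (fun x =>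
           ((x.filter (fun v => decide (v ≤ 20 ∨ v = 50))).length : Int))) (fun y => y)).getD 0)
       [((r.headD []).length : Int) + tot, ct]) =
    [((bestF t t.toNat).getD t.toNat (0, 0)).1 + tot, ((bestF t t.toNat).getD t.toNat (0, 0)).2] := by
  obtain ⟨hlen, hP⟩ := bestF_inv t ht t.toNat (by omega)
  obtain ⟨hq1, hq2, hqR, hqmin, hqmax⟩ := hP t.toNat (le_refl _)
  have htt : ((t.toNat : Nat) : Int) = t := by omega
  rw [htt] at hqR hqmin hqmax
  set q := (bestF t t.toNat).getD t.toNat (0, 0) with hqdef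
  set m := q.1.toNat with hmdef
  have hm1 : 1 ≤ m := by
    rcases Nat.eq_zero_or_pos m with h0 | h
    · exfalso
      rw [h0] at hqR
      have := ((RepD_zero _ _).1 hqR).1
      omega
    · exact h
  have hmt : (m : Int) ≤ t := by
    have := hqmin t.toNat t.toNat (by rw [← htt]; exact RepD_ones t.toNat)
    omega
  have hmemall : ∀ x, x ∈ allA ↔ x ∈ valsLit := by
    rw [allA_eq]
    exact fun x => ⟨fun h => all_sub_vals x h, fun h => vals_sub_all x h⟩
  -- the witness multiset of the DP entry, re-sorted into a cwr element
  obtain ⟨w, hwl, hwm, hws, hwc⟩ := hqR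
  obtain ⟨u, hu, hup⟩ := cwr_complete (w.length + allA.length) allA w (le_refl _)
    (fun x hx => (hmemall x).2 (hwm x hx))
  rw [hwl] at hu
  have hus : u.sum = t := by rw [hup.sum_eq, hws]
  have humem : u ∈ (cwrA allA m).filter (fun v => decide (v.sum = t)) :=
    List.mem_filter.2 ⟨hu, by simp [hus]⟩
  have hfound : (cwrA allA m).filter (fun v => decide (v.sum = t)) ≠ [] :=
    List.ne_nil_of_mem humem
  have hbelow : ∀ j : Nat, 1 ≤ j → j < m →
      (cwrA allA j).filter (fun v => decide (v.sum = t)) = [] := by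
    intro j _ hjm
    rw [List.filter_eq_nil_iff]
    intro x hx hdx
    obtain ⟨hxl, hxm⟩ := cwr_sound allA j x hx
    have hRx : RepD j t (x.countP sg) :=
      ⟨x, hxl, fun y hy => (hmemall y).1 (hxm y hy), by simpa using hdx, rfl⟩
    exact absurd (hqmin j _ hRx) (by omega)
  have hloop := loopA_found t m hm1 hmt hbelow hfound 1 (le_refl _) (by exact_mod_cast hm1)
  simp only [hloop]
  cases hr0 : (cwrA allA m).filter (fun v => decide (v.sum = t)) with
  | nil => exact absurd hr0 hfound
  | cons u0 r' =>
    rw [hr0] at humem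
    simp only [List.length_cons, List.headD_cons]
    rw [if_neg (by omega)]
    -- first component: every member of the filter has length m
    have hlenmem : ∀ x, x ∈ (cwrA allA m).filter (fun v => decide (v.sum = t)) → x.length = m := by
      intro x hx
      exact (cwr_sound allA m x (List.mem_filter.1 hx).1).1
    have hu0 : u0.length = m := hlenmem u0 (by rw [hr0]; exact List.mem_cons_self)
    have hfst : ((u0.length : Nat) : Int) = q.1 := by
      rw [hu0]
      omega
    -- second component: the max of the singles counts is exactly q.2
    have hcount : ∀ x, x ∈ (cwrA allA m).filter (fun v => decide (v.sum = t)) →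
        ((x.filter (fun v => decide (v ≤ 20 ∨ v = 50))).length : Int) ≤ q.2 := by
      intro x hx
      obtain ⟨hx1, hx2⟩ := List.mem_filter.1 hx
      obtain ⟨hxl, hxm⟩ := cwr_sound allA m x hx1
      have hRx : RepD m t (x.countP sg) :=
        ⟨x, hxl, fun y hy => (hmemall y).1 (hxm y hy), by simpa using hx2, rfl⟩
      have := hqmax _ hRx
      have hc : (x.filter (fun v => decide (v ≤ 20 ∨ v = 50))).length = x.countP sg :=
        List.countP_eq_length_filter.symm
      rw [hc]
      omega
    have hueq : ((u0.filter (fun v => decide (v ≤ 20 ∨ v = 50))).length : Int) ∈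
        ((u0 :: r').map (fun x =>
          ((x.filter (fun v => decide (v ≤ 20 ∨ v = 50))).length : Int))) := by
      exact List.mem_map.2 ⟨u0, List.mem_cons_self, rfl⟩
    have hucnt : ((u.filter (fun v => decide (v ≤ 20 ∨ v = 50))).length : Int) = q.2 := by
      have h1 : (u.filter (fun v => decide (v ≤ 20 ∨ v = 50))).length = u.countP sg :=
        List.countP_eq_length_filter.symm
      have h2 : u.countP sg = w.countP sg := hup.countP_eq _
      rw [h1, h2, hwc]
      omega
    have humem' : ((u.filter (fun v => decide (v ≤ 20 ∨ v = 50))).length : Int) ∈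
        ((u0 :: r').map (fun x =>
          ((x.filter (fun v => decide (v ≤ 20 ∨ v = 50))).length : Int))) := by
      rw [← hr0] at humem ⊢
      exact List.mem_map.2 ⟨u, humem, rfl⟩
    have hmax : PySem.List.max? ((u0 :: r').map (fun x =>
        ((x.filter (fun v => decide (v ≤ 20 ∨ v = 50))).length : Int))) (fun y => y) = some q.2 := by
      cases hmx : PySem.List.max? ((u0 :: r').map (fun x =>
          ((x.filter (fun v => decide (v ≤ 20 ∨ v = 50))).length : Int))) (fun y => y) with
      | none =>
        rw [PySem.List.max?_eq_none_iff] at hmx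
        simp at hmx
      | some mx =>
        have hmxmem := PySem.List.max?_mem hmx
        obtain ⟨x, hxmem, hxeq⟩ := List.mem_map.1 hmxmem
        have hmxle : mx ≤ q.2 := by
          rw [← hxeq]
          exact hcount x (by rw [hr0]; exact hxmem)
        have hqle : q.2 ≤ mx := by
          have := PySem.List.max?_isMax hmx _ humem'
          rw [hucnt] at this
          exact this
        rw [show mx = q.2 by omega]
    rw [hmax]
    simp only [Option.getD_some]
    rw [hfst]

-- ===== VERDICT (by name: the statement is the Claim_ definition above) =====
theorem solution_spec : Claim_equal_solution := by
  intro target _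
  unfold Spec_solution solution solution_alt
  rw [whileA_eq]
  set tot : Int := (if 300 ≤ target then PySem.Int.floordiv (target - 240) 60 else 0) with htot
  set t : Int := target - 60 * tot with htdef
  simp only [zero_add]
  by_cases ht : t ≤ 0
  · have h1 : t + 1 ≤ 1 := by omega
    rw [PySem.List.pyRange_one_eq_nil (by omega)]
    simp [loopA]
    exact fun h => absurd h (by omega)
  · have ht1 : 1 ≤ t := by omega
    rw [if_neg ht, core t ht1 tot]
    have hg : (PySem.List.pyGet? ((PySem.List.pyRange 1 (t + 1) 1).foldl (fun best s =>
        best ++ [valsB.foldl (fun (p : Int × Int) v =>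
          if v ≤ s then
            let q := (PySem.List.pyGet? best (s - v)).getD (0, 0)
            let d := q.1 + 1
            let c := if v ≤ 20 ∨ v = 50 then q.2 + 1 else q.2
            if d < p.1 ∨ (d = p.1 ∧ c > p.2) then (d, c) else p
          else p) (t + 1, 0)]) [((0 : Int), (0 : Int))]) t).getD (0, 0) =
        ((PySem.List.pyRange 1 (t + 1) 1).foldl (fun best s =>
        best ++ [valsB.foldl (fun (p : Int × Int) v =>
          if v ≤ s then
            let q := (PySem.List.pyGet? best (s - v)).getD (0, 0)
            let d := q.1 + 1
            let c := if v ≤ 20 ∨ v = 50 then q.2 + 1 else q.2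
            if d < p.1 ∨ (d = p.1 ∧ c > p.2) then (d, c) else p
          else p) (t + 1, 0)]) [((0 : Int), (0 : Int))]).getD t.toNat (0, 0) := by
      rw [PySem.List.pyGet?_of_nonneg _ (by omega), ← List.getD_eq_getElem?_getD]
    rw [hg]
    unfold bestF
    rw [show ((t.toNat : Nat) : Int) = t by omega]
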